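-- pv_equiv track=rewrite | github.com/1999John/DataStructure_DLUT | PreAndIn.py | getTherightPosi
-- ===== SOURCE A (Python) =====
-- def cmp ( l1: list, l2: list ) -> bool:
--     if len(l1) == len(l2):
--         for i in l1:
--             if i not in l2:
--                 return False
--         for i in l2:
--             if i not in l1:
--                 return False
--         return True
--     else:
--         return False
--
-- def getTherightPosi ( prelist: list, inlist: list, root ) -> int:
--     if inlist.count(root) == 1:
--         return inlist.index(root)
--     else:
--         for k, i in enumerate(inlist):
--             if i == root:
--                 if cmp(inlist[:k], prelist[1:k + 1]):
--                     return k
-- ===== SOURCE B (Python) =====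
-- def getTherightPosi(prelist, inlist, root):
--     if inlist.count(root) == 1:
--         return inlist.index(root)
--     n = len(prelist)
--     seen_in = set()
--     seen_pre = set()
--     for k, i in enumerate(inlist):
--         if 1 <= k < n:
--             seen_pre.add(prelist[k])
--         if i == root and (k == 0 or k < n) and seen_in == seen_pre:
--             return k
--         seen_in.add(i)
--     return None
-- ===== Notes on version B (the rewrite author's own statement) =====
-- stated objective: alternative
-- what changed: Instead of re-slicing both lists and running cmp's nested membership scans at every occurrence of root, B makes a single pass over inlist, maintaining the two prefix sets set(inlist[:k]) and set(prelist[1:k+1]) incrementally and comparing them (plus the slice-length condition k==0 or k<len(prelist)) at each root occurrence.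
import Mathlib
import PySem

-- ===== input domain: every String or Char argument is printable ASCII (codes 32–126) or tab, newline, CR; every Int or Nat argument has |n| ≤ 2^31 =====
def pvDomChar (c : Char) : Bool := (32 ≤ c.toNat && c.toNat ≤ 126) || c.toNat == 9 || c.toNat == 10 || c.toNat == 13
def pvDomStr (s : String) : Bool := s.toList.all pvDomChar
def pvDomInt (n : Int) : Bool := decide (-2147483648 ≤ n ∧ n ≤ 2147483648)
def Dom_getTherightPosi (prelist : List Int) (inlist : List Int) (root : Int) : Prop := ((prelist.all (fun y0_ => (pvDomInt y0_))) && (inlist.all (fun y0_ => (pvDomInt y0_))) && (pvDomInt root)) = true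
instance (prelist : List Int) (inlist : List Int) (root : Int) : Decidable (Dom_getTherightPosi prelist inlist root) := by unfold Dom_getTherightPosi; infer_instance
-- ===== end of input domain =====

-- B replaces A's "slice both lists and compare them with cmp's nested membership scans at each
-- occurrence of root" by a single pass that maintains the two prefix sets incrementally.

-- ===== PORT A =====
-- cmp(l1, l2): equal length and mutual membership (two early-return loops → List.all)
def pvCmp (l1 l2 : List Int) : Bool :=
  if l1.length = l2.length then
    (l1.all fun i => l2.contains i) && (l2.all fun i => l1.contains i)
  else false

-- 'for k, i in enumerate(inlist): if i == root: if cmp(inlist[:k], prelist[1:k+1]): return k'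
def pvALoop (prelist inlist : List Int) (root : Int) : List (Int × Int) → Option Int
  | [] => none
  | (k, i) :: rest =>
      if i = root ∧ pvCmp (PySem.List.slice inlist none (some k))
                          (PySem.List.slice prelist (some 1) (some (k + 1))) = true then
        some k
      else pvALoop prelist inlist root rest

def getTherightPosi (prelist : List Int) (inlist : List Int) (root : Int) : Option Int :=
  if PySem.List.count inlist root = 1 then
    (PySem.List.index? inlist root).map (fun j => (j : Int))
  else
    pvALoop prelist inlist root (PySem.List.enumerate inlist 0)

-- ===== PORT B =====
-- one pass; seenIn = set(inlist[:k]), seenPre = set(prelist[1:k+1]) maintained incrementally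
def pvBLoop (prelist : List Int) (root : Int) (n : Nat) :
    List Int → Nat → PySem.Set Int → PySem.Set Int → Option Int
  | [], _, _, _ => none
  | i :: rest, k, seenIn, seenPre =>
      -- 'if 1 <= k < n: seen_pre.add(prelist[k])'  (prelist.getD k 0 is exact: the guard gives k < n)
      let seenPre' := if 1 ≤ k ∧ k < n then PySem.Set.add seenPre (prelist.getD k 0) else seenPre
      if i = root ∧ (k = 0 ∨ k < n) ∧ PySem.Set.equal seenIn seenPre' = true then
        some (k : Int)
      else pvBLoop prelist root n rest (k + 1) (PySem.Set.add seenIn i) seenPre'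

def getTherightPosi_alt (prelist : List Int) (inlist : List Int) (root : Int) : Option Int :=
  if PySem.List.count inlist root = 1 then
    (PySem.List.index? inlist root).map (fun j => (j : Int))
  else
    pvBLoop prelist root prelist.length inlist 0 PySem.Set.empty PySem.Set.empty

-- ===== PRECONDITION & SPEC =====
def Spec_getTherightPosi (prelist : List Int) (inlist : List Int) (root : Int) (out : Option Int) : Prop := out = getTherightPosi_alt prelist inlist root
instance (prelist : List Int) (inlist : List Int) (root : Int) (out : Option Int) : Decidable (Spec_getTherightPosi prelist inlist root out) := by unfold Spec_getTherightPosi; infer_instance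

-- ===== CLAIM (what is proved, stated in full; the proofs are below) =====
def Claim_equal_getTherightPosi : Prop := ∀ (prelist : List Int) (inlist : List Int) (root : Int), Dom_getTherightPosi prelist inlist root → Spec_getTherightPosi prelist inlist root (getTherightPosi prelist inlist root)

-- ===== LEMMAS AND PROOFS =====

lemma pvCmp_iff (l1 l2 : List Int) :
    pvCmp l1 l2 = true ↔ l1.length = l2.length ∧ ∀ x, x ∈ l1 ↔ x ∈ l2 := by
  unfold pvCmp
  split_ifs with h
  · simp only [List.all_eq_true, Bool.and_eq_true, List.contains_iff_mem]
    constructor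
    · rintro ⟨h1, h2⟩; exact ⟨h, fun x => ⟨fun hx => h1 x hx, fun hx => h2 x hx⟩⟩
    · rintro ⟨-, h2⟩; exact ⟨fun x hx => (h2 x).1 hx, fun x hx => (h2 x).2 hx⟩
  · simp [h]

lemma cond_iff (prelist inlist : List Int) (k : Nat) (hk : k ≤ inlist.length) :
    pvCmp (inlist.take k) ((prelist.drop 1).take k) = true ↔
      ((k = 0 ∨ k < prelist.length) ∧
        PySem.Set.equal (PySem.Set.ofList (inlist.take k))
          (PySem.Set.ofList ((prelist.drop 1).take k)) = true) := by
  rw [pvCmp_iff, PySem.Set.equal_iff]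
  simp only [List.length_take, List.length_drop, PySem.Set.mem_ofList]
  constructor
  · rintro ⟨hl, hm⟩; exact ⟨by omega, hm⟩
  · rintro ⟨hl, hm⟩; exact ⟨by omega, hm⟩

lemma seenPre_step (prelist : List Int) (k : Nat) :
    (if 1 ≤ k ∧ k < prelist.length then
        PySem.Set.add (PySem.Set.ofList ((prelist.drop 1).take (k - 1))) (prelist.getD k 0)
      else PySem.Set.ofList ((prelist.drop 1).take (k - 1)))
      = PySem.Set.ofList ((prelist.drop 1).take k) := by
  split_ifs with h
  · obtain ⟨j, rfl⟩ : ∃ j, k = j + 1 := ⟨k - 1, by omega⟩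
    have hlt : j < (prelist.drop 1).length := by simp; omega
    have hget : (prelist.drop 1)[j] = prelist.getD (j + 1) 0 := by
      rw [List.getElem_drop, List.getD_eq_getElem prelist 0 (by omega)]
      congr 1; omega
    rw [List.take_add_one, List.getElem?_eq_getElem hlt, hget, Option.toList_some,
        PySem.Set.ofList_append_singleton]
    simp
  · have : (prelist.drop 1).take k = (prelist.drop 1).take (k - 1) := by
      rcases Nat.lt_or_ge k 1 with h1 | h1
      · have hk0 : k = 0 := by omega
        subst hk0; simp
      · have : (prelist.drop 1).length ≤ k - 1 := by simp; omega
        rw [List.take_of_length_le this, List.take_of_length_le (by omega)]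
    rw [this]

lemma loopEq (prelist inlist : List Int) (root : Int) :
    ∀ (m k : Nat), m = inlist.length - k → k ≤ inlist.length →
      pvALoop prelist inlist root (PySem.List.enumerate (inlist.drop k) (k : Int)) =
      pvBLoop prelist root prelist.length (inlist.drop k) k
        (PySem.Set.ofList (inlist.take k))
        (PySem.Set.ofList ((prelist.drop 1).take (k - 1))) := by
  intro m
  induction m with
  | zero =>
      intro k hm hk
      have : inlist.drop k = [] := by
        apply List.drop_eq_nil_of_le; omega
      rw [this]
      simp [pvALoop, pvBLoop, PySem.List.enumerate_nil]
  | succ m ih =>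
      intro k hm hk
      have hklt : k < inlist.length := by omega
      rw [List.drop_eq_getElem_cons hklt]
      rw [PySem.List.enumerate_cons]
      rw [pvALoop, pvBLoop]
      simp only [seenPre_step prelist k]
      have hslice1 : PySem.List.slice inlist none (some (k : Int)) = inlist.take k :=
        PySem.List.slice_to_natCast inlist k
      have hslice2 : PySem.List.slice prelist (some ((1 : Nat) : Int)) (some (((k + 1 : Nat)) : Int))
          = (prelist.drop 1).take (k + 1 - 1) := PySem.List.slice_natCast prelist 1 (k + 1)
      have hc : ((k : Int) + 1) = (((k + 1 : Nat)) : Int) := by push_cast; ring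
      have hguard : (inlist[k] = root ∧ pvCmp (PySem.List.slice inlist none (some (k : Int)))
            (PySem.List.slice prelist (some 1) (some ((k : Int) + 1))) = true) ↔
          (inlist[k] = root ∧ (k = 0 ∨ k < prelist.length) ∧
            PySem.Set.equal (PySem.Set.ofList (inlist.take k))
              (PySem.Set.ofList ((prelist.drop 1).take k)) = true) := by
        rw [hc]
        have : ((1 : Nat) : Int) = (1 : Int) := by norm_num
        rw [← this, hslice1, hslice2]
        simp only [Nat.add_sub_cancel]
        rw [and_congr_right_iff]
        intro _
        exact cond_iff prelist inlist k (le_of_lt hklt)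
      rw [if_congr hguard rfl rfl]
      split_ifs with h
      · rfl
      · have htake : PySem.Set.add (PySem.Set.ofList (inlist.take k)) inlist[k]
            = PySem.Set.ofList (inlist.take (k + 1)) := by
          rw [List.take_add_one, List.getElem?_eq_getElem hklt, Option.toList_some,
              PySem.Set.ofList_append_singleton]
        have hc2 : (k : Int) + 1 = ((k + 1 : Nat) : Int) := by push_cast; ring
        rw [hc2, htake]
        have h2 := ih (k + 1) (by omega) (by omega)
        simpa using h2

-- ===== VERDICT (by name: the statement is the Claim_ definition above) =====
theorem getTherightPosi_spec : Claim_equal_getTherightPosi := by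
  intro prelist inlist root _
  unfold Spec_getTherightPosi getTherightPosi getTherightPosi_alt
  split_ifs with h
  · rfl
  · have := loopEq prelist inlist root inlist.length 0 (by omega) (by omega)
    simpa [PySem.Set.empty] using this
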